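-- pv_equiv track=rewrite | github.com/BlacKodez/Robotic-Problem | RB_DFS.py | dfs
-- ===== SOURCE A (Python) =====
-- def dfs(graph, start, goal, obstacles):
--     stack = [(start, [start])] # Stack to store the current node and the path
--     visited = set() # Set to store visited nodes
--
--     while stack:
--         node, path = stack.pop() # Get the current node and its path
--
--         if node == goal:
--             return path # Return the path if the goal is reached
--
--         if node not in visited:
--             visited.add(node) # Mark the node as visited
--
--             # Check the neighboring nodes
--             neighbors = graph[node]
--             for neighbor in neighbors:
--                 if neighbor not in visited and neighbor not in obstacles:
--                     stack.append((neighbor, path + [neighbor])) # Add neighboring nodes to the stack with updated path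
--
--     return None # Return None if the goal is not reachable
--
-- graph = {
--     'S': ['OBS', '7', 'OBS'],
--     '3': ['OBS', '4', 'OBS', '9', '10'],
--     '4': ['3', '9', 'OBS', '10'],
--     'G': ['12', 'OBS', 'OBS'],
--     '7': ['S', '14', '13', 'OBS', 'OBS'],
--     '9': ['OBS', 'OBS', '14', '15', '16', '10', '4', '3'],
--     '10': ['OBS', 'OBS', '4', '3', '9', '15', '16', 'OBS'],
--     '12': ['OBS', 'OBS', 'OBS', 'G', '18'],
--     '13': ['7', 'OBS', '14', '20', '19'],
--     '14': ['OBS', '7', '13', '19', '20', 'OBS', '15', '9'],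
--     '15': ['9', 'OBS', '14', '20', 'OBS', '22', '16', '10'],
--     '16': ['10', '9', '15', 'OBS', '22', 'OBS', 'OBS', 'OBS'],
--     '18': ['12', 'OBS', 'OBS', 'OBS', '24'],
--     '19': ['13', '14', '20', '25', '26'],
--     '20': ['14', '13', '19', '25', '26', 'OBS', 'OBS', '15'],
--     '22': ['16', '15', 'OBS', 'OBS', '28', '29', 'OBS', 'OBS'],
--     '24': ['18', 'OBS', 'OBS', '29', '30'],
--     '25': ['19', '20', '26', '32', '31'],
--     '26': ['20', '19', '25', '31', '32', 'OBS', 'OBS', 'OBS'],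
--     '28': ['22', 'OBS', 'OBS', 'OBS', '34', '35', '29', 'OBS'],
--     '29': ['OBS', '22', '28', '34', '35', '36', '30', '24'],
--     '30': ['24', 'OBS', '29', '35', '36'],
--     '31': ['25', '26', '32', '37', '38'],
--     '32': ['26', '25', '31', '37', '38', 'OBS', 'OBS', 'OBS'],
--     '34': ['28', 'OBS', 'OBS', 'OBS', '40', '41', '35', '29'],
--     '35': ['29', '28', '34', '40', '41', '42', '36', '30'],
--     '36': ['30', '29', '35', '41', '42'],
--     '37': ['31', '32', '38'],
--     '38': ['31', '32', '37', 'OBS', 'OBS'],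
--     '40': ['34', '35', '41', 'OBS', 'OBS'],
--     '41': ['34', '40', '35', '36', '42'],
--     '42': ['36', '41', '35']
-- }
--
-- obstacles = ['OBS']
-- ===== SOURCE B (Python) =====
-- def dfs(graph, start, goal, obstacles):
--     visited = set()
--
--     def visit(node, path):
--         if node == goal:
--             return path
--         if node in visited:
--             return None
--         visited.add(node)
--         for neighbor in reversed(graph[node]):
--             if neighbor not in visited and neighbor not in obstacles:
--                 result = visit(neighbor, path + [neighbor])
--                 if result is not None:
--                     return result
--         return None
--
--     return visit(start, [start])
-- ===== Notes on version B (the rewrite author's own statement) =====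
-- stated objective: alternative
-- what changed: Replaces A's explicit stack of (node, full-path) pairs with lazy visited-checking at pop by a recursive visit(node, path) that marks on entry and recurses over reversed(graph[node]), returning the first hit; same traversal order and identical result.
-- outside the precondition, e.g. on dfs({'S': ['X', 'G']}, 'S', 'G', []): A returns ['S', 'G'], B returns ['S', 'G']
import Mathlib
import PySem

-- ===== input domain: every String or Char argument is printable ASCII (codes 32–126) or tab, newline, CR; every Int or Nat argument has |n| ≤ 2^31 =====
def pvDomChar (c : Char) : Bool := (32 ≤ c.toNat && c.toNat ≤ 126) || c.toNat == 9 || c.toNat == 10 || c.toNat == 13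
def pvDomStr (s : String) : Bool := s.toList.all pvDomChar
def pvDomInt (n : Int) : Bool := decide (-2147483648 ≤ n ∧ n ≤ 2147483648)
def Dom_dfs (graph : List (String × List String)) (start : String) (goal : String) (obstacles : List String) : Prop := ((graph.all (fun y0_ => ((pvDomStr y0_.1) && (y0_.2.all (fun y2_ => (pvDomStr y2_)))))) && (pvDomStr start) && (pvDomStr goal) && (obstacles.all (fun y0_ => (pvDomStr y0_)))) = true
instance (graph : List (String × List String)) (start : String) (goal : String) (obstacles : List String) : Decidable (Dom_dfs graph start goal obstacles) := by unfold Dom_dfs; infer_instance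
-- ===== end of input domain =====

-- B re-implements A's explicit-stack DFS (stack of (node, full path), lazy visited check at pop)
-- as a recursive DFS (visit(node, path) over reversed neighbour lists, marking on entry);
-- objective: alternative decomposition, same traversal order and result.

-- ===== PORT A =====
-- helpers for A's termination measure only (they do not change the computed value)
def pvN (graph : List (String × List String)) : Nat := (graph.map (fun p => p.2.length)).sum

def pvUnvisited (graph : List (String × List String)) (V : PySem.Set String) : Nat :=
  ((graph.map Prod.fst).filter (fun k => !(V.contains k))).length

theorem pvSub_filt (graph : List (String × List String)) (V : PySem.Set String) (n : String) :
    ((graph.map Prod.fst).filter (fun k => !((PySem.Set.add V n).contains k))).Sublist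
      ((graph.map Prod.fst).filter (fun k => !(V.contains k))) := by
  apply List.monotone_filter_right
  intro a ha
  simp only [Bool.not_eq_eq_eq_not, Bool.not_true, PySem.Set.contains_eq_listContains,
    List.contains_eq_mem, decide_eq_false_iff_not] at *
  exact fun hmem => ha ((PySem.Set.mem_add V n a).mpr (Or.inl hmem))

theorem pvUnvisited_add_le (graph : List (String × List String)) (V : PySem.Set String) (n : String) :
    pvUnvisited graph (PySem.Set.add V n) ≤ pvUnvisited graph V :=
  (pvSub_filt graph V n).length_le

theorem pvLookup_mem_keys (graph : List (String × List String)) (n : String) (l : List String)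
    (h : List.lookup n graph = some l) : n ∈ graph.map Prod.fst := by
  induction graph with
  | nil => simp [List.lookup] at h
  | cons hd tl ih =>
    obtain ⟨k, v⟩ := hd
    by_cases hb : k = n
    · simp [hb]
    · rw [List.lookup, show (n == k) = false from beq_eq_false_iff_ne.mpr (Ne.symm hb)] at h
      rw [List.map_cons]
      exact List.mem_cons_of_mem _ (ih h)

theorem pvUnvisited_add_lt (graph : List (String × List String)) (V : PySem.Set String) (n : String)
    (l : List String) (hk : List.lookup n graph = some l) (hn : ¬ n ∈ V) :
    pvUnvisited graph (PySem.Set.add V n) < pvUnvisited graph V := by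
  have hsub := pvSub_filt graph V n
  rcases Nat.lt_or_ge (pvUnvisited graph (PySem.Set.add V n)) (pvUnvisited graph V) with h | h
  · exact h
  · exfalso
    have heq : ((graph.map Prod.fst).filter (fun k => !((PySem.Set.add V n).contains k))) =
        ((graph.map Prod.fst).filter (fun k => !(V.contains k))) :=
      hsub.eq_of_length_le h
    have hmem : n ∈ (graph.map Prod.fst).filter (fun k => !(V.contains k)) := by
      simp only [List.mem_filter, Bool.not_eq_eq_eq_not, Bool.not_true,
        PySem.Set.contains_eq_listContains, List.contains_eq_mem, decide_eq_false_iff_not]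
      exact ⟨pvLookup_mem_keys graph n l hk, hn⟩
    rw [← heq] at hmem
    simp only [List.mem_filter, Bool.not_eq_eq_eq_not, Bool.not_true,
      PySem.Set.contains_eq_listContains, List.contains_eq_mem, decide_eq_false_iff_not] at hmem
    exact hmem.2 ((PySem.Set.mem_add V n n).mpr (Or.inr rfl))

theorem pvLookup_len_le (graph : List (String × List String)) (n : String) (l : List String)
    (h : List.lookup n graph = some l) : l.length ≤ pvN graph := by
  induction graph with
  | nil => simp [List.lookup] at h
  | cons hd tl ih =>
    obtain ⟨k, v⟩ := hd
    by_cases hb : k = n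
    · rw [List.lookup, show (n == k) = true from beq_iff_eq.mpr hb.symm] at h
      have hv : v = l := by injection h
      subst hv
      simp [pvN]
    · rw [List.lookup, show (n == k) = false from beq_eq_false_iff_ne.mpr (Ne.symm hb)] at h
      have := ih h
      simp [pvN] at this ⊢
      omega

theorem pvPush_len_le (obstacles : List String) (V : PySem.Set String) (path : List String)
    (l : List String) (st : List (String × List String)) :
    (l.foldl (fun st m => if m ∉ V ∧ m ∉ obstacles then (m, path ++ [m]) :: st else st) st).length
      ≤ l.length + st.length := by
  induction l generalizing st with
  | nil => simp
  | cons m ms ih =>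
    rw [List.foldl_cons]
    refine le_trans (ih _) ?_
    simp only [List.length_cons]
    split
    · simp only [List.length_cons]
      omega
    · omega

-- A's loop. The Python stack appends/pops at the RIGHT end; here the stack is held head-first
-- (push = cons, pop = head), so Python's stack reads as this list reversed — same pops in the
-- same order. graph[node] is first-match lookup; the KeyError case (missing key) is excluded by
-- Pre_dfs, where Python raises the port continues with [].
def dfsLoop (graph : List (String × List String)) (goal : String) (obstacles : List String) :
    List (String × List String) → PySem.Set String → Option (List String)
  | [], _ => none
  | (node, path) :: rest, visited =>
    if node = goal then some path
    else if node ∈ visited then dfsLoop graph goal obstacles rest visited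
    else
      let visited' := PySem.Set.add visited node
      let neighbors := (List.lookup node graph).getD []
      dfsLoop graph goal obstacles
        (neighbors.foldl (fun st m => if m ∉ visited' ∧ m ∉ obstacles then (m, path ++ [m]) :: st else st) rest)
        visited'
termination_by stack visited => pvUnvisited graph visited * (pvN graph + 1) + stack.length
decreasing_by
  · simp only [List.length_cons]; omega
  · rename_i _hgoal hvis
    simp only [dite_eq_ite]
    have hle := pvPush_len_le obstacles (PySem.Set.add visited node) path
      ((List.lookup node graph).getD []) rest
    rcases hlk : List.lookup node graph with _ | l
    · have hu := pvUnvisited_add_le graph visited node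
      simp only [hlk, Option.getD_none, List.foldl_nil] at hle ⊢
      simp only [List.length_cons]
      nlinarith
    · have hu := pvUnvisited_add_lt graph visited node l hlk hvis
      have hl : l.length ≤ pvN graph := pvLookup_len_le graph node l hlk
      simp only [hlk, Option.getD_some] at hle ⊢
      simp only [List.length_cons]
      have h1 : (pvUnvisited graph (PySem.Set.add visited node) + 1) * (pvN graph + 1)
          ≤ pvUnvisited graph visited * (pvN graph + 1) :=
        Nat.mul_le_mul_right _ hu
      nlinarith

def dfs (graph : List (String × List String)) (start : String) (goal : String) (obstacles : List String) : Option (List String) :=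
  dfsLoop graph goal obstacles [(start, [start])] PySem.Set.empty

-- ===== PORT B =====
-- B's recursive visit / its for-loop over the reversed neighbour list. The Python recursion
-- carries no fuel; the Nat argument only bounds the recursion depth (visitB is called with
-- graph.length + 1, proven sufficient below: each nested call has marked one more graph key).
-- The for-loop with early 'return result' is visitFold, threading (found-result, visited).
mutual
def visitB (graph : List (String × List String)) (goal : String) (obstacles : List String) :
    Nat → String → List String → PySem.Set String → Option (List String) × PySem.Set String
  | 0, _, _, visited => (none, visited)
  | f + 1, node, path, visited =>
    if node = goal then (some path, visited)
    else if node ∈ visited then (none, visited)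
    else
      visitFold graph goal obstacles f ((List.lookup node graph).getD []).reverse path
        (PySem.Set.add visited node)
termination_by f => (f, 0)

def visitFold (graph : List (String × List String)) (goal : String) (obstacles : List String) :
    Nat → List String → List String → PySem.Set String → Option (List String) × PySem.Set String
  | _, [], _, visited => (none, visited)
  | f, m :: ms, path, visited =>
    if m ∉ visited ∧ m ∉ obstacles then
      match visitB graph goal obstacles f m (path ++ [m]) visited with
      | (some r, W) => (some r, W)
      | (none, W) => visitFold graph goal obstacles f ms path W
    else visitFold graph goal obstacles f ms path visited
termination_by f ms _ _ => (f, ms.length + 1)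
end

def dfs_alt (graph : List (String × List String)) (start : String) (goal : String) (obstacles : List String) : Option (List String) :=
  (visitB graph goal obstacles (graph.length + 1) start [start] PySem.Set.empty).1

-- ===== PRECONDITION & SPEC =====
-- Pre_dfs excludes inputs on which the DFS can pop a node that has no adjacency entry, where
-- Python's graph[node] raises KeyError: it requires start = goal, or start to be a key and every
-- listed neighbour to be the goal, an obstacle, or itself a key. (This well-formedness condition
-- is slightly wider than the exact raise set — a run can reach the goal before touching a missing
-- key — so it also excludes some inputs on which A happens to return; see the cited example.)
def Pre_dfs (graph : List (String × List String)) (start : String) (goal : String) (obstacles : List String) : Prop :=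
  start = goal ∨
    (start ∈ graph.map Prod.fst ∧
      ∀ p ∈ graph, ∀ m ∈ p.2, m = goal ∨ m ∈ obstacles ∨ m ∈ graph.map Prod.fst)
instance (graph : List (String × List String)) (start : String) (goal : String) (obstacles : List String) : Decidable (Pre_dfs graph start goal obstacles) := by unfold Pre_dfs; infer_instance

def pvWitness_dfs : (List (String × List String)) × String × String × List String :=
  ([("S", ["OBS", "G"]), ("G", ["S"])], "S", "G", ["OBS"])

def Spec_dfs (graph : List (String × List String)) (start : String) (goal : String) (obstacles : List String) (out : Option (List String)) : Prop := out = dfs_alt graph start goal obstacles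
instance (graph : List (String × List String)) (start : String) (goal : String) (obstacles : List String) (out : Option (List String)) : Decidable (Spec_dfs graph start goal obstacles out) := by unfold Spec_dfs; infer_instance

-- ===== CLAIM (what is proved, stated in full; the proofs are below) =====
def Claim_equal_dfs : Prop := ∀ (graph : List (String × List String)) (start : String) (goal : String) (obstacles : List String), Dom_dfs graph start goal obstacles → Pre_dfs graph start goal obstacles → Spec_dfs graph start goal obstacles (dfs graph start goal obstacles)

-- ===== LEMMAS AND PROOFS =====

-- proof-side helper: process a (head-first) stack of (node, path) entries sequentially by visitB
def seqP (graph : List (String × List String)) (goal : String) (obstacles : List String) (fuel : Nat) :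
    List (String × List String) → PySem.Set String → Option (List String) × PySem.Set String
  | [], visited => (none, visited)
  | (n, p) :: rest, visited =>
    match visitB graph goal obstacles fuel n p visited with
    | (some r, W) => (some r, W)
    | (none, W) => seqP graph goal obstacles fuel rest W

-- membership-monotonicity of the visited set through visitB / visitFold, and preservation of
-- "goal is unvisited" (B never marks the goal: the goal test precedes marking)
theorem visitB_mono (graph : List (String × List String)) (goal : String) (obstacles : List String) :
    ∀ f : Nat, ∀ (n : String) (p : List String) (V : PySem.Set String),
      (∀ x, x ∈ V → x ∈ (visitB graph goal obstacles f n p V).2) ∧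
      (goal ∉ V → goal ∉ (visitB graph goal obstacles f n p V).2) := by
  intro f
  induction f with
  | zero => intro n p V; simp [visitB]
  | succ f ih =>
    have hF : ∀ (ms : List String) (p : List String) (V : PySem.Set String),
        (∀ x, x ∈ V → x ∈ (visitFold graph goal obstacles f ms p V).2) ∧
        (goal ∉ V → goal ∉ (visitFold graph goal obstacles f ms p V).2) := by
      intro ms
      induction ms with
      | nil => intro p V; simp [visitFold]
      | cons m ms ihm =>
        intro p V
        rw [visitFold]
        split
        · rcases hv : visitB graph goal obstacles f m (p ++ [m]) V with ⟨o, W⟩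
          have hB := ih m (p ++ [m]) V
          rw [hv] at hB
          cases o with
          | some r => exact hB
          | none =>
            refine ⟨fun x hx => (ihm p W).1 x (hB.1 x hx), fun hg => (ihm p W).2 (hB.2 hg)⟩
        · exact ihm p V
    intro n p V
    rw [visitB]
    split
    · exact ⟨fun x hx => hx, fun h => h⟩
    · split
      · exact ⟨fun x hx => hx, fun h => h⟩
      · rename_i hgoal hvis
        have hadd : ∀ x, x ∈ V → x ∈ PySem.Set.add V n :=
          fun x hx => (PySem.Set.mem_add V n x).mpr (Or.inl hx)
        have hgadd : goal ∉ V → goal ∉ PySem.Set.add V n := by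
          intro hg hmem
          rcases (PySem.Set.mem_add V n goal).mp hmem with h | h
          · exact hg h
          · exact hgoal h.symm
        have := hF ((List.lookup n graph).getD []).reverse p (PySem.Set.add V n)
        exact ⟨fun x hx => this.1 x (hadd x hx), fun hg => this.2 (hgadd hg)⟩

theorem pvU_mono (graph : List (String × List String)) (V W : PySem.Set String)
    (h : ∀ x, x ∈ V → x ∈ W) : pvUnvisited graph W ≤ pvUnvisited graph V := by
  apply List.Sublist.length_le
  apply List.monotone_filter_right
  intro a ha
  simp only [Bool.not_eq_eq_eq_not, Bool.not_true, PySem.Set.contains_eq_listContains,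
    List.contains_eq_mem, decide_eq_false_iff_not] at *
  exact fun hmem => ha (h a hmem)

-- fuel irrelevance: any fuel of at least 1 + (number of unvisited graph keys) gives the same result
theorem visitB_step (graph : List (String × List String)) (goal : String) (obstacles : List String) :
    ∀ f : Nat, ∀ (n : String) (p : List String) (V : PySem.Set String),
      1 + pvUnvisited graph V ≤ f →
      visitB graph goal obstacles (f + 1) n p V = visitB graph goal obstacles f n p V := by
  intro f
  induction f using Nat.strong_induction_on with
  | _ f ih =>
    intro n p V hf
    obtain ⟨f', rfl⟩ : ∃ f', f = f' + 1 := ⟨f - 1, by omega⟩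
    rw [visitB, visitB]
    split
    · rfl
    · split
      · rfl
      · rename_i hgoal hvis
        rcases hlk : List.lookup n graph with _ | l
        · simp only [Option.getD_none, List.reverse_nil]
          rw [visitFold, visitFold]
        · have hu : pvUnvisited graph (PySem.Set.add V n) < pvUnvisited graph V :=
            pvUnvisited_add_lt graph V n l hlk hvis
          have hstepF : ∀ (ms : List String) (W : PySem.Set String),
              1 + pvUnvisited graph W ≤ f' →
              visitFold graph goal obstacles (f' + 1) ms p W =
                visitFold graph goal obstacles f' ms p W := by
            intro ms
            induction ms with
            | nil => intro W _; rw [visitFold, visitFold]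
            | cons m ms ihm =>
              intro W hW
              rw [visitFold, visitFold]
              split
              · rw [ih f' (by omega) m (p ++ [m]) W hW]
                rcases hv : visitB graph goal obstacles f' m (p ++ [m]) W with ⟨o, W'⟩
                cases o with
                | some r => rfl
                | none =>
                  have hB := visitB_mono graph goal obstacles f' m (p ++ [m]) W
                  rw [hv] at hB
                  exact ihm W' (le_trans (by
                    have := pvU_mono graph W W' hB.1
                    omega) hW)
              · exact ihm W hW
          exact hstepF _ _ (by omega)

theorem visitB_irrel (graph : List (String × List String)) (goal : String) (obstacles : List String)
    (f1 f2 : Nat) (n : String) (p : List String) (V : PySem.Set String)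
    (h1 : 1 + pvUnvisited graph V ≤ f1) (h2 : 1 + pvUnvisited graph V ≤ f2) :
    visitB graph goal obstacles f1 n p V = visitB graph goal obstacles f2 n p V := by
  have aux : ∀ (k f : Nat), 1 + pvUnvisited graph V ≤ f →
      visitB graph goal obstacles (f + k) n p V = visitB graph goal obstacles f n p V := by
    intro k
    induction k with
    | zero => intro f _; rfl
    | succ k ihk =>
      intro f hf
      have : f + (k + 1) = (f + k) + 1 := by omega
      rw [this, visitB_step graph goal obstacles (f + k) n p V (by omega), ihk f hf]
  have e1 := aux (f1 - (1 + pvUnvisited graph V)) (1 + pvUnvisited graph V) (le_refl _)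
  have e2 := aux (f2 - (1 + pvUnvisited graph V)) (1 + pvUnvisited graph V) (le_refl _)
  rw [show 1 + pvUnvisited graph V + (f1 - (1 + pvUnvisited graph V)) = f1 by omega] at e1
  rw [show 1 + pvUnvisited graph V + (f2 - (1 + pvUnvisited graph V)) = f2 by omega] at e2
  rw [e1, e2]

-- A's push filter, as a static filterMap (entry (m, path + [m]) kept iff m passes A's push test)
def pvEntry (obstacles : List String) (V1 : PySem.Set String) (p : List String) (m : String) :
    Option (String × List String) :=
  if m ∉ V1 ∧ m ∉ obstacles then some (m, p ++ [m]) else none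

theorem pvPush_eq_filterMap (obstacles : List String) (V1 : PySem.Set String) (p : List String) :
    ∀ (l : List String) (st : List (String × List String)),
      l.foldl (fun st m => if m ∉ V1 ∧ m ∉ obstacles then (m, p ++ [m]) :: st else st) st =
        (l.filterMap (pvEntry obstacles V1 p)).reverse ++ st := by
  intro l
  induction l with
  | nil => intro st; simp
  | cons m ms ih =>
    intro st
    rw [List.foldl_cons, List.filterMap_cons]
    by_cases h : m ∉ V1 ∧ m ∉ obstacles
    · rw [show pvEntry obstacles V1 p m = some (m, p ++ [m]) from by simp [pvEntry, h.1, h.2],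
        if_pos h, ih]
      simp
    · rw [show pvEntry obstacles V1 p m = none from by simp [pvEntry]; tauto, if_neg h, ih]

theorem seqP_append (graph : List (String × List String)) (goal : String) (obstacles : List String)
    (fuel : Nat) (l1 l2 : List (String × List String)) (V : PySem.Set String) :
    seqP graph goal obstacles fuel (l1 ++ l2) V =
      match seqP graph goal obstacles fuel l1 V with
      | (some r, W) => (some r, W)
      | (none, W) => seqP graph goal obstacles fuel l2 W := by
  induction l1 generalizing V with
  | nil => simp [seqP]
  | cons e l1 ih =>
    obtain ⟨n, p⟩ := e
    rw [List.cons_append, seqP, seqP]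
    rcases visitB graph goal obstacles fuel n p V with ⟨o, W⟩
    cases o with
    | some r => rfl
    | none => exact ih W

-- B's dynamic per-step test (against the growing visited set) computes exactly the sequential
-- processing of A's statically filtered push list: a later dynamic rejection is reproduced by
-- visitB's own entry check.
theorem dynStat (graph : List (String × List String)) (goal : String) (obstacles : List String)
    (V1 : PySem.Set String) (p : List String) :
    ∀ (ms : List String) (W : PySem.Set String) (f fuel : Nat),
      (∀ x, x ∈ V1 → x ∈ W) → goal ∉ W →
      1 + pvUnvisited graph W ≤ f → 1 + pvUnvisited graph W ≤ fuel →
      visitFold graph goal obstacles f ms p W =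
        seqP graph goal obstacles fuel (ms.filterMap (pvEntry obstacles V1 p)) W := by
  intro ms
  induction ms with
  | nil => intro W f fuel _ _ _ _; rw [visitFold]; simp [seqP]
  | cons m ms ih =>
    intro W f fuel hsub hgoal hf hfuel
    rw [visitFold, List.filterMap_cons]
    by_cases hstat : m ∉ V1 ∧ m ∉ obstacles
    · rw [show pvEntry obstacles V1 p m = some (m, p ++ [m]) from by
        simp [pvEntry, hstat.1, hstat.2]]
      rw [seqP]
      by_cases hW : m ∈ W
      · -- dynamically rejected: visitB fuel on a visited non-goal node is a no-op
        rw [if_neg (by rintro ⟨h1, _⟩; exact h1 hW)]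
        obtain ⟨g, rfl⟩ : ∃ g, fuel = g + 1 := ⟨fuel - 1, by omega⟩
        rw [visitB]
        rw [if_neg (by rintro rfl; exact hgoal hW), if_pos hW]
        exact ih W f (g + 1) hsub hgoal hf hfuel
      · rw [if_pos ⟨hW, hstat.2⟩]
        rw [visitB_irrel graph goal obstacles f fuel m (p ++ [m]) W hf hfuel]
        rcases hv : visitB graph goal obstacles fuel m (p ++ [m]) W with ⟨o, W'⟩
        have hB := visitB_mono graph goal obstacles fuel m (p ++ [m]) W
        rw [hv] at hB
        cases o with
        | some r => rfl
        | none =>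
          have hu := pvU_mono graph W W' hB.1
          exact ih W' f fuel (fun x hx => hB.1 x (hsub x hx)) (hB.2 hgoal)
            (by omega) (by omega)
    · rw [show pvEntry obstacles V1 p m = none from by simp [pvEntry]; tauto]
      rw [if_neg (by
        rintro ⟨h1, h2⟩
        exact hstat ⟨fun hm => h1 (hsub m hm), h2⟩)]
      exact ih W f fuel hsub hgoal hf hfuel

-- main simulation: A's stack loop = sequential visitB over the (head-first) stack
theorem dfsLoop_eq_seqP (graph : List (String × List String)) (goal : String) (obstacles : List String) :
    ∀ (stack : List (String × List String)) (V : PySem.Set String), goal ∉ V →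
      ∀ fuel : Nat, 1 + pvUnvisited graph V ≤ fuel →
      dfsLoop graph goal obstacles stack V = (seqP graph goal obstacles fuel stack V).1 := by
  intro stack V
  induction stack, V using dfsLoop.induct graph goal obstacles with
  | case1 V => intro _ fuel _; rw [dfsLoop]; simp [seqP]
  | case2 path rest V =>
    intro hg fuel hfuel
    obtain ⟨g, rfl⟩ : ∃ g, fuel = g + 1 := ⟨fuel - 1, by omega⟩
    rw [dfsLoop, if_pos rfl, seqP, visitB, if_pos rfl]
  | case3 node path rest V hgoal hvis ih =>
    intro hg fuel hfuel
    obtain ⟨g, rfl⟩ : ∃ g, fuel = g + 1 := ⟨fuel - 1, by omega⟩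
    rw [dfsLoop, if_neg hgoal, if_pos hvis, seqP, visitB, if_neg hgoal, if_pos hvis]
    exact ih hg (g + 1) hfuel
  | case4 node path rest V hgoal hvis visited' neighbors ih =>
    intro hg fuel hfuel
    obtain ⟨g, rfl⟩ : ∃ g, fuel = g + 1 := ⟨fuel - 1, by omega⟩
    have hg1 : goal ∉ PySem.Set.add V node := by
      intro hmem
      rcases (PySem.Set.mem_add V node goal).mp hmem with h | h
      · exact hg h
      · exact hgoal h.symm
    rw [dfsLoop, if_neg hgoal, if_neg hvis, seqP, visitB, if_neg hgoal, if_neg hvis]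
    rcases hlk : List.lookup node graph with _ | l
    · simp only [visited', neighbors, hlk, Option.getD_none, List.foldl_nil,
        List.reverse_nil] at ih ⊢
      rw [visitFold]
      have hu := pvUnvisited_add_le graph V node
      rw [ih hg1 (g + 1) (by omega)]
    · have hu : pvUnvisited graph (PySem.Set.add V node) < pvUnvisited graph V :=
        pvUnvisited_add_lt graph V node l hlk hvis
      simp only [visited', neighbors, hlk, Option.getD_some, dite_eq_ite] at ih ⊢
      rw [pvPush_eq_filterMap obstacles (PySem.Set.add V node) path l rest] at ih ⊢
      rw [ih hg1 (g + 1) (by omega)]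
      rw [dynStat graph goal obstacles (PySem.Set.add V node) path l.reverse
        (PySem.Set.add V node) g (g + 1) (fun x hx => hx) hg1 (by omega) (by omega)]
      rw [List.filterMap_reverse]
      rw [seqP_append]

-- ===== VERDICT (by name: the statement is the Claim_ definition above) =====
theorem dfs_spec : Claim_equal_dfs := by
  intro graph start goal obstacles _ _
  unfold Spec_dfs dfs dfs_alt
  have hU : pvUnvisited graph PySem.Set.empty ≤ graph.length := by
    unfold pvUnvisited
    calc ((graph.map Prod.fst).filter _).length ≤ (graph.map Prod.fst).length :=
          List.Sublist.length_le List.filter_sublist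
      _ = graph.length := List.length_map _
  rw [dfsLoop_eq_seqP graph goal obstacles [(start, [start])] PySem.Set.empty
    (by simp [PySem.Set.empty]) (graph.length + 1) (by omega)]
  rw [seqP]
  rcases visitB graph goal obstacles (graph.length + 1) start [start] PySem.Set.empty with ⟨o, W⟩
  cases o with
  | some r => rfl
  | none => rfl
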